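-- pv_equiv track=rewrite | github.com/js0nwu/SeeSaw | Python/indv_analyze/figure_gen.py | comboIterator
-- ===== SOURCE A (Python) =====
-- def flip2Tuple(t):
--     return (t[1], t[0])
--
-- def itemFlipper(tupleList, flipList):
--     newList = []
--     for i in range(len(tupleList)):
--         if flipList[i]:
--             newList.append(flip2Tuple(tupleList[i]))
--         else:
--             newList.append(tupleList[i])
--     return newList
--
-- def comboIterator(tupleList):
--     tupleLength = len(tupleList)
--     combos = []
--     for i in range(2**tupleLength-1):
--         numerical = i+1
--         flipList = [True if d == '1' else False for d in "{0:b}".format(numerical).zfill(tupleLength)]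
--         combos.append(itemFlipper(tupleList, flipList))
--     return combos
-- ===== SOURCE B (Python) =====
-- def comboIterator(tupleList):
--     def go(rest):
--         if not rest:
--             return [[]]
--         t = rest[0]
--         tails = go(rest[1:])
--         return [[t] + tail for tail in tails] + \
--                [[(t[1], t[0])] + tail for tail in tails]
--     return go(tupleList)[1:]
-- ===== Notes on version B (the rewrite author's own statement) =====
-- stated objective: alternative
-- what changed: Replaces the integer-counting loop that formats each index as a zero-filled binary string and re-indexes the list per bit with a structural recursion on the list that builds all 2^n flip combinations directly (unflipped branch before flipped branch, sharing tails) and drops the leading no-flip combination.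
import Mathlib
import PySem

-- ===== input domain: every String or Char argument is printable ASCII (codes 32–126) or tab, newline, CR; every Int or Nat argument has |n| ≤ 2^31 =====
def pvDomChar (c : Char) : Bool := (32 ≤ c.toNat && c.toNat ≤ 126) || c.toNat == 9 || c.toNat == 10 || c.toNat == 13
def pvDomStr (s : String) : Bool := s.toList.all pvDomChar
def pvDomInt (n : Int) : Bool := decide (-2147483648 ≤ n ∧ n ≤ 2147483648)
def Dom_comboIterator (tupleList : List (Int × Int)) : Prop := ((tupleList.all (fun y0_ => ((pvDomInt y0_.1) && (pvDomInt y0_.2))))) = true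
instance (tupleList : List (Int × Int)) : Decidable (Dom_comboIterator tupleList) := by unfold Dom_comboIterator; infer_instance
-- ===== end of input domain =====

-- B replaces A's binary-string counting loop with a structural recursion that builds all flip
-- combinations directly and drops the leading no-flip one (objective: alternative algorithm).

-- ===== PORT A =====
def flip2Tuple (t : Int × Int) : Int × Int := (t.2, t.1)

-- indices are always in range at A's call sites (flipList is zfilled to len(tupleList)),
-- so pyGetD with an arbitrary default is exact here
def itemFlipper (tupleList : List (Int × Int)) (flipList : List Bool) : List (Int × Int) :=
  (PySem.List.pyRange 0 (PySem.List.len tupleList) 1).foldl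
    (fun newList i =>
      if PySem.List.pyGetD flipList i false then
        newList ++ [flip2Tuple (PySem.List.pyGetD tupleList i (0, 0))]
      else
        newList ++ [PySem.List.pyGetD tupleList i (0, 0)]) []

-- "{0:b}".format(numerical) is PySem.Int.toBinChars, .zfill is PySem.Chars.zfill (char-list level)
def comboIterator (tupleList : List (Int × Int)) : List (List (Int × Int)) :=
  let tupleLength : Int := PySem.List.len tupleList
  (PySem.List.pyRange 0 ((2 : Int) ^ tupleLength.toNat - 1) 1).foldl
    (fun combos i =>
      let numerical := i + 1
      let flipList := (PySem.Chars.zfill (PySem.Int.toBinChars numerical) tupleLength).map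
        (fun d => if d = '1' then true else false)
      combos ++ [itemFlipper tupleList flipList]) []

-- ===== PORT B =====
def comboGo : List (Int × Int) → List (List (Int × Int))
  | [] => [[]]
  | t :: rest =>
    let tails := comboGo rest
    tails.map (fun tail => t :: tail) ++ tails.map (fun tail => (t.2, t.1) :: tail)

def comboIterator_alt (tupleList : List (Int × Int)) : List (List (Int × Int)) :=
  (comboGo tupleList).drop 1

-- ===== PRECONDITION & SPEC =====
def Spec_comboIterator (tupleList : List (Int × Int)) (out : List (List (Int × Int))) : Prop := out = comboIterator_alt tupleList
instance (tupleList : List (Int × Int)) (out : List (List (Int × Int))) : Decidable (Spec_comboIterator tupleList out) := by unfold Spec_comboIterator; infer_instance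

-- ===== CLAIM (what is proved, stated in full; the proofs are below) =====
def Claim_equal_comboIterator : Prop := ∀ (tupleList : List (Int × Int)), Dom_comboIterator tupleList → Spec_comboIterator tupleList (comboIterator tupleList)

-- ===== LEMMAS AND PROOFS =====

-- flips applied positionally (common characterisation of both ports)
def appFlips : List (Int × Int) → List Bool → List (Int × Int)
  | [], _ => []
  | _ :: _, [] => []
  | t :: ts, b :: bs => (if b then (t.2, t.1) else t) :: appFlips ts bs

-- the n low bits of m, most significant first
def padbE : Nat → Nat → List Bool
  | 0, _ => []
  | n+1, m => padbE n (m / 2) ++ [decide (m % 2 = 1)]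

-- binary digits of m (= Nat.toDigits 2 m for m > 0), in structural-recursion form
def bch (m : Nat) : List Char :=
  if m < 2 then [Nat.digitChar m] else bch (m / 2) ++ [Nat.digitChar (m % 2)]
decreasing_by exact Nat.div_lt_self (by omega) (by omega)

theorem length_padbE (n m : Nat) : (padbE n m).length = n := by
  induction n generalizing m with
  | zero => rfl
  | succ n ih => simp [padbE, ih]

theorem padbE_zero (n : Nat) : padbE n 0 = List.replicate n false := by
  induction n with
  | zero => rfl
  | succ n ih => simp [padbE, ih, List.replicate_succ']

theorem padbE_split (n m : Nat) (h : m < 2 ^ (n + 1)) :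
    padbE (n + 1) m = decide (2 ^ n ≤ m) :: padbE n (m % 2 ^ n) := by
  induction n generalizing m with
  | zero =>
    interval_cases m <;> decide
  | succ n ih =>
    have h2 : m / 2 < 2 ^ (n + 1) := by
      have hps := Nat.pow_succ 2 (n + 1); omega
    have e1 : padbE (n + 1 + 1) m = padbE (n + 1) (m / 2) ++ [decide (m % 2 = 1)] := rfl
    have e2 : 2 ^ n ≤ m / 2 ↔ 2 ^ (n + 1) ≤ m := by
      rw [Nat.pow_succ 2 n]; omega
    have e3 : m / 2 % 2 ^ n = m % 2 ^ (n + 1) / 2 := by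
      rw [Nat.pow_succ'] ; exact (Nat.mod_mul_right_div_self m 2 (2 ^ n)).symm
    have e4 : m % 2 ^ (n + 1) % 2 = m % 2 := by
      exact Nat.mod_mod_of_dvd m ⟨2 ^ n, by rw [Nat.pow_succ']⟩
    rw [e1, ih _ h2, List.cons_append]
    congr 1
    · exact decide_eq_decide.mpr e2
    · show _ = padbE n (m % 2 ^ (n + 1) / 2) ++ [decide (m % 2 ^ (n + 1) % 2 = 1)]
      rw [← e3, e4]

theorem toDigitsCore_eq_bch : ∀ (f m : Nat) (l : List Char), 0 < m → m < f →
    Nat.toDigitsCore 2 f m l = bch m ++ l := by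
  intro f
  induction f with
  | zero => intro m l h1 h2; omega
  | succ f ih =>
    intro m l h1 h2
    rw [Nat.toDigitsCore]
    by_cases h : m / 2 = 0
    · have hm : m = 1 := by omega
      subst hm
      simp [bch]
    · simp only [h, if_false]
      rw [ih (m / 2) _ (by omega) (by omega)]
      have hb : bch m = bch (m / 2) ++ [Nat.digitChar (m % 2)] := by
        conv_lhs => rw [bch]
        rw [if_neg (by omega)]
      rw [hb]
      simp

theorem toBinChars_pos (z : Int) (h : 0 < z) : PySem.Int.toBinChars z = bch z.toNat := by
  unfold PySem.Int.toBinChars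
  rw [if_neg (by omega)]
  show Nat.toDigits 2 z.toNat = _
  unfold Nat.toDigits
  rw [toDigitsCore_eq_bch _ _ _ (by omega) (by omega), List.append_nil]

theorem bch_head (m : Nat) : ∃ cs, bch m = '0' :: cs ∨ bch m = '1' :: cs := by
  induction m using Nat.strong_induction_on with
  | _ m ih =>
    rw [bch]
    by_cases h : m < 2
    · interval_cases m
      · exact ⟨[], Or.inl rfl⟩
      · exact ⟨[], Or.inr rfl⟩
    · simp only [h, if_false]
      obtain ⟨cs, hc⟩ := ih (m / 2) (Nat.div_lt_self (by omega) (by omega))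
      rcases hc with hc | hc <;>
        exact ⟨cs ++ [Nat.digitChar (m % 2)], by simp [hc]⟩

theorem zfill_cons_nosign (c : Char) (ds : List Char) (hs : ¬ (c = '+' ∨ c = '-')) (n : Nat) :
    PySem.Chars.zfill (c :: ds) (n : Int)
      = List.replicate (n - (c :: ds).length) '0' ++ c :: ds := by
  rw [PySem.Chars.zfill]
  by_cases h : (n : Int) ≤ ((c :: ds).length : Int)
  · rw [if_pos h]
    have hz : n - (ds.length + 1) = 0 := by simp at h; omega
    simp [hz]
  · rw [if_neg h, if_neg hs]
    have hz : (n : Int).toNat - (c :: ds).length = n - (ds.length + 1) := by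
      simp only [List.length_cons]; omega
    simp only [List.length_cons] at hz ⊢
    rw [hz]

theorem zfill_eq_replicate (cs : List Char) (hcs : ∃ ds, cs = '0' :: ds ∨ cs = '1' :: ds) (n : Nat) :
    PySem.Chars.zfill cs (n : Int) = List.replicate (n - cs.length) '0' ++ cs := by
  obtain ⟨ds, hc⟩ := hcs
  rcases hc with hc | hc <;> subst hc <;> exact zfill_cons_nosign _ _ (by decide) n

theorem mapIsOne (n : Nat) : ∀ m, 0 < m → m < 2 ^ n →
    (List.replicate (n - (bch m).length) '0' ++ bch m).map (fun d => if d = '1' then true else false)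
      = padbE n m := by
  induction n with
  | zero => intro m h1 h2; omega
  | succ n ih =>
    intro m h1 h2
    by_cases hm : m < 2
    · have : m = 1 := by omega
      subst this
      rw [bch]
      simp only [if_pos (by omega)]
      show (List.replicate (n + 1 - 1) '0' ++ ['1']).map _ = _
      have : padbE (n + 1) 1 = padbE n 0 ++ [true] := by simp [padbE]
      rw [this, padbE_zero]
      simp [List.map_replicate]
    · rw [bch, if_neg hm]
      have hlen : (bch (m / 2) ++ [Nat.digitChar (m % 2)]).length = (bch (m / 2)).length + 1 := by
        simp
      rw [hlen]
      have e1 : n + 1 - ((bch (m / 2)).length + 1) = n - (bch (m / 2)).length := by omega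
      rw [e1, ← List.append_assoc, List.map_append,
        ih (m / 2) (by omega) (by rw [Nat.pow_succ] at h2; omega)]
      have e2 : (([Nat.digitChar (m % 2)]).map (fun d => if d = '1' then true else false))
          = [decide (m % 2 = 1)] := by
        rcases Nat.mod_two_eq_zero_or_one m with h | h <;> rw [h] <;> decide
      rw [e2]
      rfl

theorem foldl_append_map {α β : Type} (xs : List α) (g : α → β) (init : List β) :
    xs.foldl (fun acc x => acc ++ [g x]) init = init ++ xs.map g := by
  induction xs generalizing init with
  | nil => simp
  | cons x xs ih => simp [List.foldl_cons, ih]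

theorem range_map_eq_appFlips (tl : List (Int × Int)) : ∀ fl : List Bool, tl.length ≤ fl.length →
    (List.range tl.length).map
      (fun k => if fl.getD k false then flip2Tuple (tl.getD k (0, 0)) else tl.getD k (0, 0))
      = appFlips tl fl := by
  induction tl with
  | nil => intro fl _; rfl
  | cons t ts ih =>
    intro fl h
    cases fl with
    | nil => simp at h
    | cons b bs =>
      rw [List.length_cons, List.range_succ_eq_map, List.map_cons, List.map_map]
      rw [show appFlips (t :: ts) (b :: bs) = (if b then (t.2, t.1) else t) :: appFlips ts bs from rfl]
      congr 1
      · refine (List.map_congr_left ?_).trans (ih bs (by simpa using h))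
        intro k _
        simp [List.getD, flip2Tuple, Nat.succ_eq_add_one,
          List.getElem?_cons_succ]

theorem itemFlipper_eq_appFlips (tl : List (Int × Int)) (fl : List Bool)
    (h : tl.length ≤ fl.length) : itemFlipper tl fl = appFlips tl fl := by
  unfold itemFlipper
  have hbody : (fun (newList : List (Int × Int)) (i : Int) =>
      if PySem.List.pyGetD fl i false then
        newList ++ [flip2Tuple (PySem.List.pyGetD tl i (0, 0))]
      else newList ++ [PySem.List.pyGetD tl i (0, 0)])
      = fun newList i => newList ++ [if PySem.List.pyGetD fl i false then
          flip2Tuple (PySem.List.pyGetD tl i (0, 0)) else PySem.List.pyGetD tl i (0, 0)] := by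
    funext acc i; split <;> rfl
  rw [hbody, foldl_append_map, List.nil_append]
  rw [show PySem.List.len tl = (tl.length : Int) from PySem.List.len_eq tl]
  rw [PySem.List.pyRange_zero_nat, List.map_map]
  simp only [Function.comp_def, PySem.List.pyGetD_natCast]
  exact range_map_eq_appFlips tl fl h

theorem comboGo_eq (tl : List (Int × Int)) :
    comboGo tl = (List.range (2 ^ tl.length)).map (fun m => appFlips tl (padbE tl.length m)) := by
  induction tl with
  | nil => rfl
  | cons t ts ih =>
    show (comboGo ts).map _ ++ (comboGo ts).map _ = _
    rw [List.length_cons, pow_succ, mul_two, List.range_add, List.map_append, List.map_map, ih,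
      List.map_map, List.map_map]
    congr 1
    · apply List.map_congr_left
      intro m hm
      rw [List.mem_range] at hm
      have : padbE (ts.length + 1) m = decide (2 ^ ts.length ≤ m) :: padbE ts.length (m % 2 ^ ts.length) := by
        exact padbE_split _ _ (by have hps := Nat.pow_succ 2 ts.length; omega)
      simp only [Function.comp_def, this]
      rw [Nat.mod_eq_of_lt hm]
      have : ¬ (2 ^ ts.length ≤ m) := by omega
      simp [appFlips, this]
    · apply List.map_congr_left
      intro m hm
      rw [List.mem_range] at hm
      have hlt : 2 ^ ts.length + m < 2 ^ (ts.length + 1) := by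
        rw [Nat.pow_succ]; omega
      have : padbE (ts.length + 1) (2 ^ ts.length + m)
          = decide (2 ^ ts.length ≤ 2 ^ ts.length + m) :: padbE ts.length ((2 ^ ts.length + m) % 2 ^ ts.length) := padbE_split _ _ hlt
      simp only [Function.comp_def, this]
      rw [Nat.add_mod_left, Nat.mod_eq_of_lt hm]
      simp [appFlips]

theorem comboIterator_eq (tl : List (Int × Int)) :
    comboIterator tl = (List.range (2 ^ tl.length - 1)).map
      (fun k => appFlips tl (padbE tl.length (k + 1))) := by
  unfold comboIterator
  rw [foldl_append_map, List.nil_append]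
  have hlen : (PySem.List.len tl).toNat = tl.length := by
    rw [PySem.List.len_eq]; omega
  rw [hlen]
  have hnn : ((2 : Int) ^ tl.length - 1).toNat = 2 ^ tl.length - 1 := by
    have : ((2 : Int) ^ tl.length) = ((2 ^ tl.length : Nat) : Int) := by push_cast; ring
    rw [this]
    have : (1 : Nat) ≤ 2 ^ tl.length := Nat.one_le_two_pow
    omega
  rw [PySem.List.pyRange_zero, hnn, List.map_map]
  apply List.map_congr_left
  intro k hk
  rw [List.mem_range] at hk
  simp only [Function.comp_def]
  have hk1 : k + 1 < 2 ^ tl.length := by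
    have : (1 : Nat) ≤ 2 ^ tl.length := Nat.one_le_two_pow
    omega
  have hz : ((k : Int) + 1) = ((k + 1 : Nat) : Int) := by push_cast; ring
  rw [hz, toBinChars_pos _ (by omega)]
  have : ((k + 1 : Nat) : Int).toNat = k + 1 := by omega
  rw [this]
  rw [PySem.List.len_eq, zfill_eq_replicate _ (bch_head (k + 1))]
  rw [mapIsOne tl.length (k + 1) (by omega) hk1]
  exact itemFlipper_eq_appFlips tl _ (by rw [length_padbE])

-- ===== VERDICT (by name: the statement is the Claim_ definition above) =====
theorem comboIterator_spec : Claim_equal_comboIterator := by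
  intro tl _
  show comboIterator tl = comboIterator_alt tl
  rw [comboIterator_eq, comboIterator_alt, comboGo_eq]
  have h1 : (1 : Nat) ≤ 2 ^ tl.length := Nat.one_le_two_pow
  rw [show 2 ^ tl.length = (2 ^ tl.length - 1) + 1 by omega, List.range_succ_eq_map]
  rw [List.map_cons, List.drop_one, List.tail_cons, List.map_map]
  apply List.map_congr_left
  intro k _
  simp [Function.comp, Nat.succ_eq_add_one]
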